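-- pv_equiv track=rewrite | github.com/birkirRU/algorithmic-experience | M01/large_factor.py | find_small_factors
-- ===== SOURCE A (Python) =====
-- primes = [2, 3, 5, 7, 11, 13, 17, 19, 23, 29, 31, 37, 41, 43, 47, 53, 59, 61, 67, 71, 73, 79, 83, 89, 97]
--
-- def is_prime(num):
--     if num in primes:
--         return True
--     return False
--
-- def find_small_factors(n):
--     listi = []
--     if is_prime(n):
--         return listi + [n]
--
--     for i in primes:
--         while(n % i == 0):
--             return listi + find_small_factors(n // i) + [i]
--     return listi
-- ===== SOURCE B (Python) =====
-- primes = [2, 3, 5, 7, 11, 13, 17, 19, 23, 29, 31, 37, 41, 43, 47, 53, 59, 61, 67, 71, 73, 79, 83, 89, 97]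
--
-- def find_small_factors(n):
--     factors = []
--     while True:
--         for i in primes:
--             if n % i == 0:
--                 factors.append(i)
--                 n //= i
--                 break
--         else:
--             return factors[::-1]
-- ===== Notes on version B (the rewrite author's own statement) =====
-- stated objective: simpler
-- what changed: Replaced A's self-recursion (is_prime shortcut plus recursive call prepending the factor) with a flat iterative while-loop that scans the prime list for the first divisor, accumulates factors in extraction order, and reverses once at the end.
-- outside the precondition, e.g. on find_small_factors(0): A raises RecursionError, B does not finish within the time limit
import Mathlib
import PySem

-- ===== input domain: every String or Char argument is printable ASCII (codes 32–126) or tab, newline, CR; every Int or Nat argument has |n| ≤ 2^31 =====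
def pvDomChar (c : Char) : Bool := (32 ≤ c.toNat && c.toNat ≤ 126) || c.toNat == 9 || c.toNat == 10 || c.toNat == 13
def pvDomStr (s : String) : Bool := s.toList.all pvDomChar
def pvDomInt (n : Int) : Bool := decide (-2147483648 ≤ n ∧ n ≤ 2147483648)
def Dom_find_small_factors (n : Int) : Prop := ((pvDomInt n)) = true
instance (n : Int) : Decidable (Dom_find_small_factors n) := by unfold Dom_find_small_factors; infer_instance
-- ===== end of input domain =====

-- B replaces A's recursion with an iterative first-divisor loop accumulating factors and reversing once (objective: simpler).
-- Both Pythons fail to terminate at n = 0 (A: RecursionError, B: infinite loop); Pre_ excludes n = 0.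

-- ===== PORT A =====
def primesL : List Int := [2, 3, 5, 7, 11, 13, 17, 19, 23, 29, 31, 37, 41, 43, 47, 53, 59, 61, 67, 71, 73, 79, 83, 89, 97]

def is_prime (num : Int) : Bool := if num ∈ primesL then true else false

-- A's for-loop: return on the first prime i with n % i == 0 (the inner while returns immediately).
def find_small_factors_loop (rec : Int → List Int) (n : Int) : List Int → List Int
  | [] => []
  | i :: rest =>
    if PySem.Int.mod n i = 0 then [] ++ rec (PySem.Int.floordiv n i) ++ [i]
    else find_small_factors_loop rec n rest

-- fuel-indexed transliteration of A's recursion; fuel n.natAbs suffices for every n ≠ 0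
def find_small_factors_go : Nat → Int → List Int
  | 0, _ => []
  | fuel + 1, n =>
    if is_prime n then [] ++ [n]
    else find_small_factors_loop (find_small_factors_go fuel) n primesL

def find_small_factors (n : Int) : List Int := find_small_factors_go n.natAbs n

-- ===== PORT B =====
-- B's inner for…else: first prime dividing n, or none
def find_small_factors_alt_scan (n : Int) : List Int → Option Int
  | [] => none
  | i :: rest =>
    if PySem.Int.mod n i = 0 then some i else find_small_factors_alt_scan n rest

-- fuel-indexed transliteration of B's while True loop
def find_small_factors_alt_go : Nat → Int → List Int → List Int
  | 0, _, factors => factors.reverse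
  | fuel + 1, n, factors =>
    match find_small_factors_alt_scan n primesL with
    | some i => find_small_factors_alt_go fuel (PySem.Int.floordiv n i) (factors ++ [i])
    | none => factors.reverse

def find_small_factors_alt (n : Int) : List Int := find_small_factors_alt_go n.natAbs n []

-- ===== PRECONDITION & SPEC =====
-- Pre_ excludes only n = 0, on which Python A raises RecursionError (and B loops forever).
def Pre_find_small_factors (n : Int) : Prop := n ≠ 0
instance (n : Int) : Decidable (Pre_find_small_factors n) := by unfold Pre_find_small_factors; infer_instance
def pvWitness_find_small_factors : Int := 12

def Spec_find_small_factors (n : Int) (out : List Int) : Prop := out = find_small_factors_alt n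
instance (n : Int) (out : List Int) : Decidable (Spec_find_small_factors n out) := by unfold Spec_find_small_factors; infer_instance

-- ===== CLAIM (what is proved, stated in full; the proofs are below) =====
def Claim_equal_find_small_factors : Prop := ∀ (n : Int), Dom_find_small_factors n → Pre_find_small_factors n → Spec_find_small_factors n (find_small_factors n)

-- ===== LEMMAS AND PROOFS =====

-- A's loop over primes equals B's scan, packaged
theorem loop_eq_scan (rec : Int → List Int) (n : Int) (ps : List Int) :
    find_small_factors_loop rec n ps =
      match find_small_factors_alt_scan n ps with
      | some i => rec (PySem.Int.floordiv n i) ++ [i]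
      | none => [] := by
  induction ps with
  | nil => rfl
  | cons i rest ih =>
    by_cases h : PySem.Int.mod n i = 0 <;>
      simp [find_small_factors_loop, find_small_factors_alt_scan, h, ih]

theorem scan_mem {n i : Int} {ps : List Int} (h : find_small_factors_alt_scan n ps = some i) :
    i ∈ ps ∧ PySem.Int.mod n i = 0 := by
  induction ps with
  | nil => simp [find_small_factors_alt_scan] at h
  | cons j rest ih =>
    by_cases hj : PySem.Int.mod n j = 0
    · simp [find_small_factors_alt_scan, hj] at h
      subst h; exact ⟨List.mem_cons_self, hj⟩
    · simp [find_small_factors_alt_scan, hj] at h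
      rcases ih h with ⟨h1, h2⟩
      exact ⟨List.mem_cons_of_mem _ h1, h2⟩

theorem primes_two_le : ∀ i ∈ primesL, 2 ≤ i := by decide

theorem scan_prime : ∀ p ∈ primesL, find_small_factors_alt_scan p primesL = some p := by decide

theorem scan_one : find_small_factors_alt_scan 1 primesL = none := by decide

theorem floordiv_prime_self : ∀ p ∈ primesL, PySem.Int.floordiv p p = 1 := by decide

-- the quotient shrinks: divisor facts
theorem quotient_facts {n i : Int} (hn : n ≠ 0) (hi : i ∈ primesL)
    (hd : PySem.Int.mod n i = 0) :
    PySem.Int.floordiv n i ≠ 0 ∧ (PySem.Int.floordiv n i).natAbs < n.natAbs := by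
  have h2 : 2 ≤ i := primes_two_le i hi
  have hdvd : i ∣ n := (PySem.Int.mod_eq_zero_iff_dvd n i).mp hd
  have hq : PySem.Int.floordiv n i = n / i := PySem.Int.floordiv_eq_ediv_of_pos (by omega)
  obtain ⟨q, hqeq⟩ := hdvd
  have hiq : n / i = q := by rw [hqeq]; exact Int.mul_ediv_cancel_left q (by omega)
  have hq0 : q ≠ 0 := by rintro rfl; simp at hqeq; omega
  constructor
  · rw [hq, hiq]; exact hq0
  · rw [hq, hiq, hqeq, Int.natAbs_mul]
    have : 2 ≤ i.natAbs := by omega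
    have : 1 ≤ q.natAbs := Int.natAbs_pos.mpr hq0
    nlinarith

-- main invariant: B's loop is A's recursion followed by the reversed accumulator
theorem go_eq (fuel : Nat) : ∀ (n : Int) (acc : List Int), n ≠ 0 → n.natAbs ≤ fuel →
    find_small_factors_alt_go fuel n acc = find_small_factors_go fuel n ++ acc.reverse := by
  induction fuel with
  | zero => intro n acc hn hf; omega
  | succ k ih =>
    intro n acc hn hf
    by_cases hp : is_prime n = true
    · -- n is one of the listed primes
      have hmem : n ∈ primesL := by
        by_contra hc; simp [is_prime, hc] at hp
      have hscan := scan_prime n hmem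
      have h2 : 2 ≤ n := primes_two_le n hmem
      have hfd : PySem.Int.floordiv n n = 1 := floordiv_prime_self n hmem
      have hk1 : 1 ≤ k := by
        have : 2 ≤ n.natAbs := by omega
        omega
      have hgoB : find_small_factors_alt_go (k + 1) n acc =
          find_small_factors_alt_go k 1 (acc ++ [n]) := by
        simp [find_small_factors_alt_go, hscan, hfd]
      have hone : find_small_factors_alt_go k 1 (acc ++ [n]) = (acc ++ [n]).reverse := by
        obtain ⟨k', rfl⟩ : ∃ k', k = k' + 1 := ⟨k - 1, by omega⟩
        simp [find_small_factors_alt_go, scan_one]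
      simp [hgoB, hone, find_small_factors_go, hp]
    · simp only [find_small_factors_go, hp, loop_eq_scan]
      cases hscan : find_small_factors_alt_scan n primesL with
      | none => simp [find_small_factors_alt_go, hscan]
      | some i =>
        rcases scan_mem hscan with ⟨hmem, hdiv⟩
        rcases quotient_facts hn hmem hdiv with ⟨hne, hlt⟩
        have := ih (PySem.Int.floordiv n i) (acc ++ [i]) hne (by omega)
        simp [find_small_factors_alt_go, hscan, this]

-- ===== VERDICT (by name: the statement is the Claim_ definition above) =====
theorem find_small_factors_spec : Claim_equal_find_small_factors := by
  intro n _ hpre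
  unfold Spec_find_small_factors find_small_factors find_small_factors_alt
  have := go_eq n.natAbs n [] hpre le_rfl
  simp [this]
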